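-- pv_equiv track=rewrite | github.com/ddela-dev/pyCheckio_solutions | scientific-expedition/caps-lock.py | caps_lock
-- ===== SOURCE A (Python) =====
-- def caps_lock(text: str) -> str:
--     chars=list(text)
--     new=""
--     caps=False
--     for c in chars:
--         if c == "a":
--             if caps:
--                 caps=False
--             else:
--                 caps=True
--         else:
--             if caps:
--                 new+=c.upper()
--             else:
--                 new+=c
--     return new
-- ===== SOURCE B (Python) =====
-- def caps_lock(text: str) -> str:
--     return "".join(seg.upper() if i % 2 else seg
--                    for i, seg in enumerate(text.split("a")))
-- ===== Notes on version B (the rewrite author's own statement) =====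
-- stated objective: idiomatic
-- what changed: Replaces the stateful per-character caps toggle loop with a structural split on the toggle character followed by uppercasing the odd-indexed segments and joining.
import Mathlib
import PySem

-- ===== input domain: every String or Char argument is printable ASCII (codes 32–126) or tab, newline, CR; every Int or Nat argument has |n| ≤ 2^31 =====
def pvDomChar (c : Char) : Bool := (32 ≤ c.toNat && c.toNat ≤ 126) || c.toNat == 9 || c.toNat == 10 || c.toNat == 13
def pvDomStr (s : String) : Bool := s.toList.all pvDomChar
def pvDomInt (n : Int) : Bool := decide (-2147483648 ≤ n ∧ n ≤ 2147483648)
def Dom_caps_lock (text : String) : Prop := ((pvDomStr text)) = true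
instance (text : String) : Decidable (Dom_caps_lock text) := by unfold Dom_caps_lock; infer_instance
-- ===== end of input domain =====

-- B replaces A's stateful per-character caps toggle with split-on-'a' + uppercase odd segments + join (idiomatic).

-- ===== PORT A =====
def caps_lock (text : String) : String :=
  let chars := text.toList
  let r := chars.foldl (fun (st : List Char × Bool) c =>
      if c = 'a' then
        (if st.2 then (st.1, false) else (st.1, true))
      else
        (if st.2 then (st.1 ++ [PySem.Chars.upperChar c], st.2) else (st.1 ++ [c], st.2)))
    ([], false)
  String.ofList r.1

-- ===== PORT B =====
def caps_lock_alt (text : String) : String :=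
  let segs := List.splitOn 'a' text.toList   -- text.split("a")
  String.ofList (PySem.Chars.join []
    ((PySem.List.enumerate segs).map (fun p => if p.1 % 2 = 1 then PySem.Chars.upper p.2 else p.2)))

-- ===== PRECONDITION & SPEC =====
def Spec_caps_lock (text : String) (out : String) : Prop := out = caps_lock_alt text
instance (text : String) (out : String) : Decidable (Spec_caps_lock text out) := by unfold Spec_caps_lock; infer_instance

-- ===== CLAIM (what is proved, stated in full; the proofs are below) =====
def Claim_equal_caps_lock : Prop := ∀ (text : String), Dom_caps_lock text → Spec_caps_lock text (caps_lock text)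

-- ===== LEMMAS AND PROOFS =====

/-- A's loop, as structural recursion on the characters. -/
def goCaps : Bool → List Char → List Char
  | _, [] => []
  | caps, c :: rest =>
    if c = 'a' then goCaps (!caps) rest
    else (if caps then PySem.Chars.upperChar c else c) :: goCaps caps rest

/-- The caps flag at the end of A's loop. -/
def endCaps : Bool → List Char → Bool
  | caps, [] => caps
  | caps, c :: rest => endCaps (if c = 'a' then !caps else caps) rest

/-- B's alternating renderer over the segments. -/
def renderCaps : Bool → List (List Char) → List Char
  | _, [] => []
  | caps, s :: rest => (if caps then PySem.Chars.upper s else s) ++ renderCaps (!caps) rest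

theorem foldA_eq (cs : List Char) : ∀ (acc : List Char) (caps : Bool),
    cs.foldl (fun (st : List Char × Bool) c =>
      if c = 'a' then
        (if st.2 then (st.1, false) else (st.1, true))
      else
        (if st.2 then (st.1 ++ [PySem.Chars.upperChar c], st.2) else (st.1 ++ [c], st.2)))
      (acc, caps)
    = (acc ++ goCaps caps cs, endCaps caps cs) := by
  induction cs with
  | nil => intro acc caps; simp [goCaps, endCaps]
  | cons c t ih =>
    intro acc caps
    by_cases hc : c = 'a'
    · cases caps <;> simp [hc, List.foldl_cons, ih, goCaps, endCaps]
    · cases caps <;> simp [hc, List.foldl_cons, ih, goCaps, endCaps]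

theorem splitOn_cons_char (c : Char) (t : List Char) :
    List.splitOn 'a' (c :: t) =
      if c = 'a' then [] :: List.splitOn 'a' t
      else List.modifyHead (List.cons c) (List.splitOn 'a' t) := by
  simp only [List.splitOn, List.splitOnP_cons]
  split <;> split <;> simp_all

theorem goCaps_eq_render (cs : List Char) : ∀ caps,
    goCaps caps cs = renderCaps caps (List.splitOn 'a' cs) := by
  induction cs with
  | nil => intro caps; cases caps <;> simp [goCaps, List.splitOn, renderCaps, PySem.Chars.upper]
  | cons c t ih =>
    intro caps
    rw [splitOn_cons_char]
    by_cases hc : c = 'a'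
    · subst hc
      simp only [goCaps, ih]
      cases caps <;> simp [renderCaps, PySem.Chars.upper]
    · obtain ⟨s, r, hsr⟩ : ∃ s r, List.splitOn 'a' t = s :: r := by
        cases h : List.splitOn 'a' t with
        | nil => exact absurd h (List.splitOnP_ne_nil _ t)
        | cons s r => exact ⟨s, r, rfl⟩
      simp only [if_neg hc, hsr, List.modifyHead]
      simp only [goCaps, if_neg hc, ih, hsr, renderCaps]
      cases caps <;> simp [PySem.Chars.upper]

theorem join_cons (x : List Char) (l : List (List Char)) :
    PySem.Chars.join [] (x :: l) = x ++ PySem.Chars.join [] l := by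
  cases l <;> simp [PySem.Chars.join, List.intercalate, List.intersperse]

theorem joinEnum_eq_render (segs : List (List Char)) : ∀ (i : Int), 0 ≤ i →
    PySem.Chars.join []
      ((PySem.List.enumerate segs i).map (fun p => if p.1 % 2 = 1 then PySem.Chars.upper p.2 else p.2))
    = renderCaps (decide (i % 2 = 1)) segs := by
  induction segs with
  | nil => intro i _; simp [PySem.List.enumerate, renderCaps, PySem.Chars.join, List.intercalate]
  | cons s r ih =>
    intro i hi
    rw [PySem.List.enumerate_cons, List.map_cons, join_cons, ih (i + 1) (by omega)]
    have hpar : ((i + 1) % 2 = 1) ↔ ¬ (i % 2 = 1) := by omega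
    by_cases h : i % 2 = 1
    · simp [renderCaps, h, hpar]
    · simp [renderCaps, h, hpar]

-- ===== VERDICT (by name: the statement is the Claim_ definition above) =====
theorem caps_lock_spec : Claim_equal_caps_lock := by
  intro text _
  unfold Spec_caps_lock caps_lock caps_lock_alt
  dsimp only
  rw [foldA_eq text.toList [] false]
  rw [joinEnum_eq_render (List.splitOn 'a' text.toList) 0 (by norm_num)]
  simp [goCaps_eq_render]
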